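-- pv_equiv track=rewrite | github.com/JoaquinMulet/SEMEN | team_formation.py | calculate_co_play_counts
-- ===== SOURCE A (Python) =====
-- from collections import defaultdict
--
-- def calculate_co_play_counts(match_history):
--     """
--     Calculate how many times each pair of players has played together
--
--     Args:
--         match_history (list): List of tuples (player_id, match_id, team)
--
--     Returns:
--         dict: Nested dictionary mapping player pairs to co-play counts
--     """
--     co_play_counts = defaultdict(lambda: defaultdict(int))
--
--     # Group players by match and team
--     match_teams = defaultdict(lambda: defaultdict(list))
--     for player_id, match_id, team in match_history:
--         match_teams[match_id][team].append(player_id)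
--
--     # Count co-plays within each team
--     for match_id, teams in match_teams.items():
--         for team, players in teams.items():
--             for player1 in players:
--                 for player2 in players:
--                     if player1 != player2:
--                         co_play_counts[player1][player2] += 1
--
--     return co_play_counts
-- ===== SOURCE B (Python) =====
-- from collections import defaultdict
--
-- def calculate_co_play_counts(match_history):
--     # Group into multisets: match -> team -> {player: multiplicity}
--     groups = {}
--     for player_id, match_id, team in match_history:
--         cnt = groups.setdefault(match_id, {}).setdefault(team, {})
--         cnt[player_id] = cnt.get(player_id, 0) + 1
--     # Flat accumulation keyed by the ordered pair: (p, q) -> weighted co-play count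
--     flat = {}
--     for teams in groups.values():
--         for cnt in teams.values():
--             for p, cp in cnt.items():
--                 for q, cq in cnt.items():
--                     if p != q:
--                         flat[(p, q)] = flat.get((p, q), 0) + cp * cq
--     # Regroup the flat table into the nested defaultdict shape
--     co_play_counts = defaultdict(lambda: defaultdict(int))
--     for (p, q), v in flat.items():
--         co_play_counts[p][q] = v
--     return co_play_counts
-- ===== Notes on version B (the rewrite author's own statement) =====
-- stated objective: alternative
-- what changed: B groups each (match,team) into a player->multiplicity counter instead of an occurrence list, accumulates weighted co-play contributions (cp*cq per distinct player pair) into one flat dict keyed by the ordered pair, and finally regroups that flat table into the nested dict, instead of A's in-place nested-defaultdict unit increments over all occurrence pairs.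
import Mathlib
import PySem

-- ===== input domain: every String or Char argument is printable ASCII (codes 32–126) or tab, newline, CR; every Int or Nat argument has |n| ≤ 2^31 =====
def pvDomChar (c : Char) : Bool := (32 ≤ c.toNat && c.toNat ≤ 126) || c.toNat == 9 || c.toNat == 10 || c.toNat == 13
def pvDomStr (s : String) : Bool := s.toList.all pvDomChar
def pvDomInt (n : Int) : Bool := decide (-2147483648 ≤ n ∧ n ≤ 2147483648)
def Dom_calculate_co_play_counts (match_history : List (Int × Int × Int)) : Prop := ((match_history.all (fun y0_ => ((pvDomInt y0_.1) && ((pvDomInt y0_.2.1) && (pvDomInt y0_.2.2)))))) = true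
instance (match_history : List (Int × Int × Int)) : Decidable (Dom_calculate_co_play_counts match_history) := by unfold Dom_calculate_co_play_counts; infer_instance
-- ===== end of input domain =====

-- B replaces A's nested-defaultdict unit increments over all occurrence pairs by counters per
-- (match, team), a flat pair-keyed accumulation of cp*cq weights, and a final regrouping pass
-- (objective: alternative; equal return value, proved below).

-- ===== PORT A =====
def calculate_co_play_counts (match_history : List (Int × Int × Int)) : List (Int × List (Int × Int)) :=
  -- match_teams[match_id][team].append(player_id)   (nested defaultdicts)
  let match_teams : PySem.Dict Int (PySem.Dict Int (List Int)) :=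
    match_history.foldl (fun mt x =>
      mt.modify x.2.1 PySem.Dict.empty (fun teams =>
        teams.modify x.2.2 [] (fun players => players ++ [x.1]))) PySem.Dict.empty
  -- for each match, team: for player1 in players: for player2 in players:
  --   if player1 != player2: co_play_counts[player1][player2] += 1
  let co : PySem.Dict Int (PySem.Dict Int Int) :=
    match_teams.items.foldl (fun co mt =>
      mt.2.items.foldl (fun co tp =>
        tp.2.foldl (fun co player1 =>
          tp.2.foldl (fun co player2 =>
            if player1 ≠ player2 then
              co.modify player1 PySem.Dict.empty (fun row => row.modify player2 0 (· + 1))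
            else co) co) co) co) PySem.Dict.empty
  co.items.map (fun kv => (kv.1, kv.2.items))

-- ===== PORT B =====
def calculate_co_play_counts_alt (match_history : List (Int × Int × Int)) : List (Int × List (Int × Int)) :=
  -- groups.setdefault(match_id, {}).setdefault(team, {});  cnt[p] = cnt.get(p, 0) + 1
  let groups : PySem.Dict Int (PySem.Dict Int (PySem.Dict Int Int)) :=
    match_history.foldl (fun g x =>
      g.modify x.2.1 PySem.Dict.empty (fun teams =>
        teams.modify x.2.2 (PySem.Dict.empty : PySem.Dict Int Int) (fun cnt =>
          cnt.insert x.1 (cnt.getD x.1 0 + 1)))) PySem.Dict.empty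
  -- flat[(p, q)] = flat.get((p, q), 0) + cp * cq   for distinct p, q in each team counter
  let flat : PySem.Dict (Int × Int) Int :=
    groups.items.foldl (fun fl mt =>
      mt.2.items.foldl (fun fl tc =>
        tc.2.items.foldl (fun fl pc =>
          tc.2.items.foldl (fun fl qc =>
            if pc.1 ≠ qc.1 then
              fl.insert (pc.1, qc.1) (fl.getD (pc.1, qc.1) 0 + pc.2 * qc.2)
            else fl) fl) fl) fl) PySem.Dict.empty
  -- regroup the flat table:  co_play_counts[p][q] = v
  let co : PySem.Dict Int (PySem.Dict Int Int) :=
    flat.items.foldl (fun co kv =>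
      co.modify kv.1.1 PySem.Dict.empty (fun row => row.insert kv.1.2 kv.2)) PySem.Dict.empty
  co.items.map (fun kv => (kv.1, kv.2.items))

-- ===== PRECONDITION & SPEC =====
def Spec_calculate_co_play_counts (match_history : List (Int × Int × Int)) (out : List (Int × List (Int × Int))) : Prop := out = calculate_co_play_counts_alt match_history
instance (match_history : List (Int × Int × Int)) (out : List (Int × List (Int × Int))) : Decidable (Spec_calculate_co_play_counts match_history out) := by unfold Spec_calculate_co_play_counts; infer_instance

-- ===== CLAIM (what is proved, stated in full; the proofs are below) =====
def Claim_equal_calculate_co_play_counts : Prop := ∀ (match_history : List (Int × Int × Int)), Dom_calculate_co_play_counts match_history → Spec_calculate_co_play_counts match_history (calculate_co_play_counts match_history)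

-- ===== LEMMAS AND PROOFS =====

-- ---- proof-only helper definitions ----

-- one co-play "event" (p, q, k) means co[p][q] += k
def pvNestStep (co : PySem.Dict Int (PySem.Dict Int Int)) (e : Int × Int × Int) : PySem.Dict Int (PySem.Dict Int Int) :=
  co.modify e.1 PySem.Dict.empty (fun row => row.modify e.2.1 0 (· + e.2.2))

def pvFlatStep (fl : PySem.Dict (Int × Int) Int) (e : Int × Int × Int) : PySem.Dict (Int × Int) Int :=
  fl.modify (e.1, e.2.1) 0 (· + e.2.2)

def pvRegroup (fl : PySem.Dict (Int × Int) Int) : PySem.Dict Int (PySem.Dict Int Int) :=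
  fl.items.foldl (fun co kv => co.modify kv.1.1 PySem.Dict.empty (fun row => row.insert kv.1.2 kv.2)) PySem.Dict.empty

-- events generated by A for one team occurrence list
def pvEvA (xs : List Int) : List (Int × Int × Int) :=
  xs.flatMap (fun p => (xs.filter (fun q => p != q)).map (fun q => (p, q, (1 : Int))))

-- events generated by B for one team counter
def pvEvB (c : PySem.Dict Int Int) : List (Int × Int × Int) :=
  c.items.flatMap (fun pc => (c.items.filter (fun qc => pc.1 != qc.1)).map (fun qc => (pc.1, qc.1, pc.2 * qc.2)))

def pvQl (E : List (Int × Int × Int)) (p : Int) : List Int :=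
  (E.filter (fun e => e.1 == p)).map (fun e => e.2.1)

def pvSum (E : List (Int × Int × Int)) (p q : Int) : Int :=
  (((E.filter (fun e => e.1 == p)).filter (fun e => e.2.1 == q)).map (fun e => e.2.2)).sum

-- the canonical value of a nested co-play dict produced by an event list
def pvCanon (E : List (Int × Int × Int)) : List (Int × List (Int × Int)) :=
  (PySem.Set.ofList (E.map (fun e => e.1))).map
    (fun p => (p, (PySem.Set.ofList (pvQl E p)).map (fun q => (q, pvSum E p q))))

-- the team occurrence lists, in A's traversal order
def pvGroups (match_history : List (Int × Int × Int)) : List (List Int) :=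
  ((match_history.foldl (fun mt (x : Int × Int × Int) =>
      mt.modify x.2.1 PySem.Dict.empty (fun teams =>
        teams.modify x.2.2 [] (fun players => players ++ [x.1]))) PySem.Dict.empty).items).flatMap
    (fun mt => mt.2.items.map (fun tp => tp.2))

-- ---- generic dictionary lemma ----

theorem pv_getD_foldl_modify_key {κ ν : Type} [BEq κ] [LawfulBEq κ] {β : Type}
    (l : List β) (key : β → κ) (d0 : ν) (f : β → ν → ν) (d : PySem.Dict κ ν) (k : κ) :
    (l.foldl (fun d x => d.modify (key x) d0 (f x)) d).getD k d0
      = (l.filter (fun x => key x == k)).foldl (fun v x => f x v) (d.getD k d0) := by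
  induction l generalizing d with
  | nil => rfl
  | cons x l ih =>
    simp only [List.foldl_cons, List.filter_cons]
    by_cases h : key x = k
    · have hb : (key x == k) = true := beq_iff_eq.mpr h
      rw [hb, if_pos rfl, List.foldl_cons, ih, h, PySem.Dict.getD_modify_self]
    · have hb : (key x == k) = false := by simp [h]
      rw [hb]
      simp only [Bool.false_eq_true, if_false]
      rw [ih, PySem.Dict.getD_modify_of_ne _ _ _ (fun hk => h hk.symm)]

-- ---- generic Set lemmas ----

theorem pv_contains_true {α : Type} [BEq α] [LawfulBEq α] (s : PySem.Set α) (x : α)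
    (h : x ∈ s) : PySem.Set.contains s x = true := by
  simp only [PySem.Set.contains]
  exact List.contains_iff_mem.mpr h

theorem pv_contains_false {α : Type} [BEq α] [LawfulBEq α] (s : PySem.Set α) (x : α)
    (h : x ∉ s) : PySem.Set.contains s x = false := by
  simp only [PySem.Set.contains]
  rw [Bool.eq_false_iff]
  intro hc
  exact h (List.contains_iff_mem.mp hc)

theorem pv_add_mem {α : Type} [BEq α] [LawfulBEq α] (s : PySem.Set α) (x : α)
    (h : x ∈ s) : s.add x = s := by
  simp only [PySem.Set.add, pv_contains_true s x h, if_pos]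

theorem pv_add_not_mem {α : Type} [BEq α] [LawfulBEq α] (s : PySem.Set α) (x : α)
    (h : x ∉ s) : s.add x = s ++ [x] := by
  simp only [PySem.Set.add, pv_contains_false s x h, Bool.false_eq_true, if_false]

theorem pv_update_absorb {α : Type} [BEq α] [LawfulBEq α] (s : PySem.Set α) (l : List α)
    (h : ∀ x ∈ l, x ∈ s) : s.update l = s := by
  rw [PySem.Set.update_eq_append_filter]
  have hnil : (PySem.Set.ofList l).filter (fun y => !s.contains y) = [] := by
    rw [List.filter_eq_nil_iff]
    intro a ha
    have hmem : a ∈ l := (PySem.Set.mem_ofList l a).mp ha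
    rw [pv_contains_true s a (h a hmem)]
    simp
  rw [hnil, List.append_nil]

theorem pv_update_congr {α : Type} [BEq α] [LawfulBEq α] (s : PySem.Set α) (l l' : List α)
    (h : PySem.Set.ofList l = PySem.Set.ofList l') : s.update l = s.update l' := by
  rw [PySem.Set.update_eq_append_filter, PySem.Set.update_eq_append_filter, h]

theorem pv_ofList_idem {α : Type} [BEq α] [LawfulBEq α] (l : List α) (h : l.Nodup) :
    PySem.Set.ofList l = l := by
  induction l using List.reverseRecOn with
  | nil => rfl
  | append_singleton l x ih =>
    have h' := List.nodup_append.mp h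
    have hl : l.Nodup := h'.1
    have hx : x ∉ l := fun hxl => h'.2.2 x hxl x (List.mem_singleton_self x) rfl
    have hx2 : x ∉ PySem.Set.ofList l := fun hm => hx ((PySem.Set.mem_ofList l x).mp hm)
    rw [PySem.Set.ofList_append, PySem.Set.update_cons, PySem.Set.update_nil,
        pv_add_not_mem _ _ hx2, ih hl]

theorem pv_ofList_filter {α : Type} [BEq α] [LawfulBEq α] (pr : α → Bool) (l : List α) :
    PySem.Set.ofList (l.filter pr) = (PySem.Set.ofList l).filter pr := by
  induction l using List.reverseRecOn with
  | nil => rfl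
  | append_singleton l x ih =>
    rw [PySem.Set.ofList_append, PySem.Set.update_cons, PySem.Set.update_nil, List.filter_append]
    by_cases hp : pr x
    · have hfx : List.filter pr [x] = [x] := by simp [hp]
      rw [hfx, PySem.Set.ofList_append, PySem.Set.update_cons, PySem.Set.update_nil, ih]
      by_cases hmem : x ∈ PySem.Set.ofList l
      · have hm1 : x ∈ (PySem.Set.ofList l).filter pr := List.mem_filter.mpr ⟨hmem, hp⟩
        rw [pv_add_mem _ _ hm1, pv_add_mem _ _ hmem]
      · have hm1 : x ∉ (PySem.Set.ofList l).filter pr := fun hm => hmem (List.mem_of_mem_filter hm)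
        rw [pv_add_not_mem _ _ hm1, pv_add_not_mem _ _ hmem, List.filter_append]
        simp [hp]
    · have hfx : List.filter pr [x] = [] := by simp [hp]
      rw [hfx, List.append_nil, ih]
      by_cases hmem : x ∈ PySem.Set.ofList l
      · rw [pv_add_mem _ _ hmem]
      · rw [pv_add_not_mem _ _ hmem, List.filter_append]
        simp [hp]

theorem pv_ofList_map_inj {α β : Type} [BEq α] [LawfulBEq α] [BEq β] [LawfulBEq β]
    (f : α → β) (l : List α) (hinj : ∀ x ∈ l, ∀ y ∈ l, f x = f y → x = y) :
    PySem.Set.ofList (l.map f) = (PySem.Set.ofList l).map f := by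
  induction l using List.reverseRecOn with
  | nil => rfl
  | append_singleton l x ih =>
    have hinj' : ∀ a ∈ l, ∀ b ∈ l, f a = f b → a = b := fun a ha b hb =>
      hinj a (List.mem_append_left _ ha) b (List.mem_append_left _ hb)
    rw [List.map_append, PySem.Set.ofList_append, PySem.Set.ofList_append]
    simp only [List.map_cons, List.map_nil]
    rw [PySem.Set.update_cons, PySem.Set.update_nil, PySem.Set.update_cons, PySem.Set.update_nil,
        ih hinj']
    by_cases hmem : x ∈ PySem.Set.ofList l
    · have hxl : x ∈ l := (PySem.Set.mem_ofList l x).mp hmem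
      have hfm : f x ∈ (PySem.Set.ofList l).map f := List.mem_map_of_mem hmem
      rw [pv_add_mem _ _ hfm, pv_add_mem _ _ hmem]
    · have hxl : x ∉ l := fun hx => hmem ((PySem.Set.mem_ofList l x).mpr hx)
      have hfm : f x ∉ (PySem.Set.ofList l).map f := by
        intro hm
        obtain ⟨y, hy, hfy⟩ := List.mem_map.mp hm
        have hyl : y ∈ l := (PySem.Set.mem_ofList l y).mp hy
        have : y = x := hinj y (List.mem_append_left _ hyl) x
          (List.mem_append_right _ (List.mem_singleton_self x)) hfy
        exact hxl (this ▸ hyl)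
      rw [pv_add_not_mem _ _ hfm, pv_add_not_mem _ _ hmem, List.map_append]
      simp

theorem pv_ofList_map_ofList {α β : Type} [BEq α] [LawfulBEq α] [BEq β] [LawfulBEq β]
    (f : α → β) (l : List α) :
    PySem.Set.ofList ((PySem.Set.ofList l).map f) = PySem.Set.ofList (l.map f) := by
  induction l using List.reverseRecOn with
  | nil => rfl
  | append_singleton l x ih =>
    rw [List.map_append, PySem.Set.ofList_append, PySem.Set.ofList_append]
    simp only [List.map_cons, List.map_nil]
    rw [PySem.Set.update_cons, PySem.Set.update_nil, PySem.Set.update_cons, PySem.Set.update_nil]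
    by_cases hmem : x ∈ PySem.Set.ofList l
    · have hxl : x ∈ l := (PySem.Set.mem_ofList l x).mp hmem
      have hfx : f x ∈ PySem.Set.ofList (l.map f) :=
        (PySem.Set.mem_ofList _ _).mpr (List.mem_map_of_mem hxl)
      rw [pv_add_mem _ _ hmem, ih, pv_add_mem _ _ hfx]
    · rw [pv_add_not_mem _ _ hmem, List.map_append]
      simp only [List.map_cons, List.map_nil]
      rw [PySem.Set.ofList_append, PySem.Set.update_cons, PySem.Set.update_nil, ih]

theorem pv_update_flatMap_congr {α β : Type} [BEq β] [LawfulBEq β]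
    (l : List α) (g h : α → List β)
    (hc : ∀ x ∈ l, PySem.Set.ofList (g x) = PySem.Set.ofList (h x)) :
    ∀ s : PySem.Set β, s.update (l.flatMap g) = s.update (l.flatMap h) := by
  induction l with
  | nil => intro s; rfl
  | cons x l ih =>
    intro s
    rw [List.flatMap_cons, List.flatMap_cons, PySem.Set.update_append, PySem.Set.update_append,
        pv_update_congr s (g x) (h x) (hc x (List.mem_cons_self)),
        ih (fun y hy => hc y (List.mem_cons_of_mem x hy))]

theorem pv_ofList_flatMap_congr {α β : Type} [BEq β] [LawfulBEq β]
    (l : List α) (g h : α → List β)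
    (hc : ∀ x ∈ l, PySem.Set.ofList (g x) = PySem.Set.ofList (h x)) :
    PySem.Set.ofList (l.flatMap g) = PySem.Set.ofList (l.flatMap h) := by
  rw [← PySem.Set.update_nil_left, ← PySem.Set.update_nil_left]
  exact pv_update_flatMap_congr l g h hc []

-- flatMap whose chunks repeat their seed element: its set is the set of the seeds
theorem pv_update_flatMap_rep {α : Type} [BEq α] [LawfulBEq α]
    (ys : List α) (f : α → List α)
    (h1 : ∀ x ∈ ys, f x ≠ []) (h2 : ∀ x ∈ ys, ∀ z ∈ f x, z = x) :
    ∀ s : PySem.Set α, s.update (ys.flatMap f) = s.update ys := by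
  induction ys with
  | nil => intro s; rfl
  | cons x ys ih =>
    intro s
    rw [List.flatMap_cons, PySem.Set.update_append, PySem.Set.update_cons]
    have hupd : s.update (f x) = s.add x := by
      cases hfx : f x with
      | nil => exact absurd hfx (h1 x List.mem_cons_self)
      | cons z rest =>
        have hz : z = x := h2 x List.mem_cons_self z (by rw [hfx]; exact List.mem_cons_self)
        rw [PySem.Set.update_cons, hz]
        apply pv_update_absorb
        intro w hw
        have : w = x := h2 x List.mem_cons_self w (by rw [hfx, hz]; exact List.mem_cons_of_mem _ hw)
        rw [this]
        exact (PySem.Set.mem_add s x x).mpr (Or.inr rfl)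
    rw [hupd]
    exact ih (fun a ha => h1 a (List.mem_cons_of_mem x ha))
      (fun a ha => h2 a (List.mem_cons_of_mem x ha)) (s.add x)

-- flatMap with a fixed block at the hits of p
theorem pv_update_flatMap_if {α β : Type} [BEq α] [LawfulBEq α] [BEq β] [LawfulBEq β]
    (ys : List α) (p : α) (B0 : List β) :
    ∀ s : PySem.Set β, s.update (ys.flatMap (fun y => if y == p then B0 else []))
      = if p ∈ ys then s.update B0 else s := by
  induction ys with
  | nil => intro s; simp
  | cons y ys ih =>
    intro s
    rw [List.flatMap_cons, PySem.Set.update_append]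
    by_cases hy : y = p
    · have hb : (y == p) = true := beq_iff_eq.mpr hy
      rw [hb, if_pos rfl, ih]
      have habs : (s.update B0).update B0 = s.update B0 := by
        apply pv_update_absorb
        intro w hw
        exact (PySem.Set.mem_update s B0 w).mpr (Or.inr hw)
      by_cases hmem : p ∈ ys
      · simp only [hmem, if_pos, habs]
        have : p ∈ y :: ys := List.mem_cons_of_mem y hmem
        simp [this]
      · simp only [hmem, if_false]
        have : p ∈ y :: ys := by rw [hy]; exact List.mem_cons_self
        simp [this]
    · have hb : (y == p) = false := by simp [hy]
      rw [hb]
      simp only [Bool.false_eq_true, if_false, PySem.Set.update_nil, ih]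
      have : (p ∈ y :: ys) ↔ (p ∈ ys) := by
        constructor
        · intro hm
          rcases List.mem_cons.mp hm with h | h
          · exact absurd h.symm hy
          · exact h
        · exact List.mem_cons_of_mem y
      by_cases hmem : p ∈ ys
      · simp [hmem, this.mpr hmem]
      · have : p ∉ y :: ys := fun hm => hmem (this.mp hm)
        simp [hmem, this]

-- ---- sum helpers ----

theorem pv_sum_ite_const (xs : List Int) (p : Int) (c : Int) :
    ((xs.map (fun x => if x == p then c else 0)).sum) = (xs.count p : Int) * c := by
  induction xs with
  | nil => simp
  | cons x xs ih =>
    by_cases h : x = p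
    · have hb : (x == p) = true := beq_iff_eq.mpr h
      have hcount : (x :: xs).count p = xs.count p + 1 := by
        rw [List.count_cons]
        simp [h]
      rw [List.map_cons, List.sum_cons, ih, hb, if_pos rfl, hcount]
      push_cast
      ring
    · have hb : (x == p) = false := by simp [h]
      have hcount : (x :: xs).count p = xs.count p := by
        simp only [List.count_cons]
        simp
        exact h
      rw [List.map_cons, List.sum_cons, ih, hb, hcount]
      simp

theorem pv_sum_flatMap {α : Type} (l : List α) (g : α → List Int) :
    (l.flatMap g).sum = (l.map (fun x => (g x).sum)).sum := by
  induction l with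
  | nil => rfl
  | cons x l ih =>
    rw [List.flatMap_cons, List.sum_append, List.map_cons, List.sum_cons, ih]

-- ---- characterization of the nested accumulation (A's counting loops) ----

theorem pv_canon_nest (E : List (Int × Int × Int)) :
    ((E.foldl pvNestStep PySem.Dict.empty).items.map (fun kv => (kv.1, kv.2.items))) = pvCanon E := by
  have hkeys : (E.foldl pvNestStep PySem.Dict.empty).keys
      = PySem.Set.ofList (E.map (fun e => e.1)) := by
    have h := PySem.Dict.keys_foldl_modify_key E (fun e => e.1) PySem.Dict.empty
      (fun _ e row => row.modify e.2.1 0 (· + e.2.2)) PySem.Dict.empty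
    simp only [PySem.Dict.keys_empty, PySem.Set.update_nil_left] at h
    exact h
  have hnodup : (E.foldl pvNestStep PySem.Dict.empty).keys.Nodup :=
    PySem.Dict.nodup_keys_foldl_modify_key E (fun e => e.1) PySem.Dict.empty
      (fun _ e row => row.modify e.2.1 0 (· + e.2.2)) PySem.Dict.empty PySem.Dict.nodup_keys_empty
  have hrow : ∀ p, (E.foldl pvNestStep PySem.Dict.empty).getD p PySem.Dict.empty
      = (E.filter (fun e => e.1 == p)).foldl
          (fun row e => row.modify e.2.1 0 (· + e.2.2)) PySem.Dict.empty := by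
    intro p
    have h := pv_getD_foldl_modify_key E (fun e => e.1) PySem.Dict.empty
      (fun e row => row.modify e.2.1 0 (· + e.2.2)) PySem.Dict.empty p
    simp only [PySem.Dict.getD_empty] at h
    exact h
  have hrowkeys : ∀ p, ((E.filter (fun e => e.1 == p)).foldl
      (fun row e => row.modify e.2.1 0 (· + e.2.2)) (PySem.Dict.empty : PySem.Dict Int Int)).keys
      = PySem.Set.ofList (pvQl E p) := by
    intro p
    have h := PySem.Dict.keys_foldl_modify_key (E.filter (fun e => e.1 == p)) (fun e => e.2.1) (0 : Int)
      (fun _ e v => v + e.2.2) PySem.Dict.empty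
    simp only [PySem.Dict.keys_empty, PySem.Set.update_nil_left] at h
    simp only [pvQl]
    exact h
  have hrownodup : ∀ p, ((E.filter (fun e => e.1 == p)).foldl
      (fun row e => row.modify e.2.1 0 (· + e.2.2)) (PySem.Dict.empty : PySem.Dict Int Int)).keys.Nodup :=
    fun p => PySem.Dict.nodup_keys_foldl_modify_key (E.filter (fun e => e.1 == p)) (fun e => e.2.1) 0
      (fun _ e v => v + e.2.2) PySem.Dict.empty PySem.Dict.nodup_keys_empty
  have hrowget : ∀ p q, ((E.filter (fun e => e.1 == p)).foldl
      (fun row e => row.modify e.2.1 0 (· + e.2.2)) (PySem.Dict.empty : PySem.Dict Int Int)).getD q 0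
      = pvSum E p q := by
    intro p q
    have h := pv_getD_foldl_modify_key (E.filter (fun e => e.1 == p)) (fun e => e.2.1) (0 : Int)
      (fun e v => v + e.2.2) PySem.Dict.empty q
    simp only [PySem.Dict.getD_empty] at h
    rw [h, PySem.List.foldl_add ((E.filter (fun e => e.1 == p)).filter (fun e => e.2.1 == q))
      (fun e => e.2.2) 0]
    simp [pvSum]
  rw [PySem.Dict.items_eq_map_keys _ hnodup PySem.Dict.empty, List.map_map, hkeys]
  simp only [pvCanon]
  apply List.map_congr_left
  intro p _
  simp only [Function.comp]
  rw [hrow p, PySem.Dict.items_eq_map_keys _ (hrownodup p) 0, hrowkeys p]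
  refine congrArg (fun z => (p, z)) ?_
  apply List.map_congr_left
  intro q _
  rw [hrowget p q]

-- ---- characterization of B's flat accumulation + regroup ----

theorem pv_canon_flat (E : List (Int × Int × Int)) :
    ((pvRegroup (E.foldl pvFlatStep PySem.Dict.empty)).items.map (fun kv => (kv.1, kv.2.items))) = pvCanon E := by
  have hkeys : (E.foldl pvFlatStep PySem.Dict.empty).keys
      = PySem.Set.ofList (E.map (fun e => (e.1, e.2.1))) := by
    have h := PySem.Dict.keys_foldl_modify_key E (fun e => (e.1, e.2.1)) (0 : Int)
      (fun _ e v => v + e.2.2) PySem.Dict.empty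
    simp only [PySem.Dict.keys_empty, PySem.Set.update_nil_left] at h
    exact h
  have hnodup : (E.foldl pvFlatStep PySem.Dict.empty).keys.Nodup :=
    PySem.Dict.nodup_keys_foldl_modify_key E (fun e => (e.1, e.2.1)) 0
      (fun _ e v => v + e.2.2) PySem.Dict.empty PySem.Dict.nodup_keys_empty
  have hget : ∀ p q : Int, (E.foldl pvFlatStep PySem.Dict.empty).getD (p, q) 0 = pvSum E p q := by
    intro p q
    have h := pv_getD_foldl_modify_key E (fun e => (e.1, e.2.1)) (0 : Int)
      (fun e v => v + e.2.2) PySem.Dict.empty (p, q)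
    simp only [PySem.Dict.getD_empty] at h
    have hfold : List.foldl pvFlatStep PySem.Dict.empty E
        = List.foldl (fun d x => d.modify (x.1, x.2.1) 0 fun v => v + x.2.2) PySem.Dict.empty E := rfl
    rw [hfold, h, PySem.List.foldl_add]
    have hpred : E.filter (fun e => (e.1, e.2.1) == (p, q))
        = (E.filter (fun e => e.1 == p)).filter (fun e => e.2.1 == q) := by
      rw [List.filter_filter]
      apply List.filter_congr
      intro e _
      show ((e.1, e.2.1) == (p, q)) = ((e.2.1 == q) && (e.1 == p))
      rw [show ((e.1, e.2.1) == (p, q)) = ((e.1 == p) && (e.2.1 == q)) from rfl, Bool.and_comm]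
    rw [hpred]
    simp [pvSum]
  have hitems : (E.foldl pvFlatStep PySem.Dict.empty).items
      = (PySem.Set.ofList (E.map (fun e => (e.1, e.2.1)))).map (fun z => (z, pvSum E z.1 z.2)) := by
    rw [PySem.Dict.items_eq_map_keys _ hnodup 0, hkeys]
    apply List.map_congr_left
    intro z _
    have hz : (E.foldl pvFlatStep PySem.Dict.empty).getD z 0 = pvSum E z.1 z.2 := hget z.1 z.2
    rw [hz]
  have hrkeys : (pvRegroup (E.foldl pvFlatStep PySem.Dict.empty)).keys
      = PySem.Set.ofList (E.map (fun e => e.1)) := by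
    have h := PySem.Dict.keys_foldl_modify_key (E.foldl pvFlatStep PySem.Dict.empty).items
      (fun kv => kv.1.1) PySem.Dict.empty (fun _ kv row => row.insert kv.1.2 kv.2) PySem.Dict.empty
    simp only [PySem.Dict.keys_empty, PySem.Set.update_nil_left] at h
    have h2 : (pvRegroup (E.foldl pvFlatStep PySem.Dict.empty)).keys
        = PySem.Set.ofList ((E.foldl pvFlatStep PySem.Dict.empty).items.map (fun kv => kv.1.1)) := h
    rw [h2, hitems, List.map_map]
    have h3 : ((fun kv : (Int × Int) × Int => kv.1.1) ∘ (fun z : Int × Int => (z, pvSum E z.1 z.2)))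
        = fun z : Int × Int => z.1 := rfl
    rw [h3, pv_ofList_map_ofList (fun z : Int × Int => z.1) (E.map (fun e => (e.1, e.2.1))),
      List.map_map]
    rfl
  have hrnodup : (pvRegroup (E.foldl pvFlatStep PySem.Dict.empty)).keys.Nodup :=
    PySem.Dict.nodup_keys_foldl_modify_key (E.foldl pvFlatStep PySem.Dict.empty).items
      (fun kv => kv.1.1) PySem.Dict.empty (fun _ kv row => row.insert kv.1.2 kv.2)
      PySem.Dict.empty PySem.Dict.nodup_keys_empty
  have hrget : ∀ p, (pvRegroup (E.foldl pvFlatStep PySem.Dict.empty)).getD p PySem.Dict.empty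
      = ((E.foldl pvFlatStep PySem.Dict.empty).items.filter (fun kv => kv.1.1 == p)).foldl
          (fun row kv => row.insert kv.1.2 kv.2) PySem.Dict.empty := by
    intro p
    have h := pv_getD_foldl_modify_key (E.foldl pvFlatStep PySem.Dict.empty).items
      (fun kv => kv.1.1) PySem.Dict.empty (fun kv row => row.insert kv.1.2 kv.2) PySem.Dict.empty p
    simp only [PySem.Dict.getD_empty] at h
    exact h
  have hrowitems : ∀ p, (((E.foldl pvFlatStep PySem.Dict.empty).items.filter
        (fun kv => kv.1.1 == p)).foldl
        (fun row kv => row.insert kv.1.2 kv.2) (PySem.Dict.empty : PySem.Dict Int Int)).items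
      = ((E.foldl pvFlatStep PySem.Dict.empty).items.filter (fun kv => kv.1.1 == p)).map
          (fun kv => (kv.1.2, kv.2)) := by
    intro p
    have hfst : (((E.foldl pvFlatStep PySem.Dict.empty).items.filter
        (fun kv => kv.1.1 == p)).map (fun kv => kv.1)).Nodup := by
      have hsub : ((E.foldl pvFlatStep PySem.Dict.empty).items.filter
          (fun kv => kv.1.1 == p)).Sublist (E.foldl pvFlatStep PySem.Dict.empty).items :=
        List.filter_sublist
      have hkeysn : ((E.foldl pvFlatStep PySem.Dict.empty).items.map (fun kv => kv.1)).Nodup := hnodup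
      exact hkeysn.sublist (hsub.map _)
    have hmemp : ∀ kv ∈ (E.foldl pvFlatStep PySem.Dict.empty).items.filter
        (fun kv => kv.1.1 == p), kv.1.1 = p := by
      intro kv hkv
      exact beq_iff_eq.mp (List.mem_filter.mp hkv).2
    have hsnd : (((E.foldl pvFlatStep PySem.Dict.empty).items.filter
        (fun kv => kv.1.1 == p)).map (fun kv => kv.1.2)).Nodup := by
      have hinj := List.inj_on_of_nodup_map hfst
      have hlnodup : ((E.foldl pvFlatStep PySem.Dict.empty).items.filter
          (fun kv => kv.1.1 == p)).Nodup := hfst.of_map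
      apply List.Nodup.map_on ?_ hlnodup
      intro x hx y hy hxy
      apply hinj hx hy
      exact Prod.ext (by rw [hmemp x hx, hmemp y hy]) hxy
    have h := PySem.Dict.items_foldl_insert_fresh
      ((E.foldl pvFlatStep PySem.Dict.empty).items.filter (fun kv => kv.1.1 == p))
      (fun kv => kv.1.2) (fun kv => kv.2) PySem.Dict.empty
      (fun a _ => PySem.Dict.contains_empty _) hsnd
    simpa using h
  rw [PySem.Dict.items_eq_map_keys _ hrnodup PySem.Dict.empty, List.map_map, hrkeys]
  simp only [pvCanon]
  apply List.map_congr_left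
  intro p _
  simp only [Function.comp]
  rw [hrget p, hrowitems p]
  refine congrArg (fun z => (p, z)) ?_
  rw [hitems, List.filter_map, List.map_map]
  have hpc : ((fun kv : (Int × Int) × Int => kv.1.1 == p) ∘ (fun z : Int × Int => (z, pvSum E z.1 z.2)))
      = fun z : Int × Int => z.1 == p := rfl
  have hmc : ((fun kv : (Int × Int) × Int => (kv.1.2, kv.2)) ∘ (fun z : Int × Int => (z, pvSum E z.1 z.2)))
      = fun z : Int × Int => (z.2, pvSum E z.1 z.2) := rfl
  rw [hpc, hmc]
  have hfl : (PySem.Set.ofList (E.map (fun e => (e.1, e.2.1)))).filter (fun z : Int × Int => z.1 == p)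
      = (PySem.Set.ofList (pvQl E p)).map (fun q => (p, q)) := by
    rw [← pv_ofList_filter]
    have h1 : (E.map (fun e => (e.1, e.2.1))).filter (fun z : Int × Int => z.1 == p)
        = (E.filter (fun e => e.1 == p)).map (fun e => (e.1, e.2.1)) := by
      rw [List.filter_map]
      rfl
    rw [h1]
    have h2 : (E.filter (fun e => e.1 == p)).map (fun e => (e.1, e.2.1))
        = (pvQl E p).map (fun q => (p, q)) := by
      simp only [pvQl, List.map_map]
      apply List.map_congr_left
      intro e he
      have : e.1 = p := beq_iff_eq.mp (List.mem_filter.mp he).2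
      simp [Function.comp, this]
    rw [h2]
    exact pv_ofList_map_inj (fun q => (p, q)) (pvQl E p)
      (fun x _ y _ hxy => congrArg Prod.snd hxy)
  rw [hfl, List.map_map]
  rfl

-- ---- loop flattening and the grouping relation ----

theorem pv_loopA (items : List (Int × PySem.Dict Int (List Int))) (co : PySem.Dict Int (PySem.Dict Int Int)) :
    items.foldl (fun co mt =>
      mt.2.items.foldl (fun co tp =>
        tp.2.foldl (fun co player1 =>
          tp.2.foldl (fun co player2 =>
            if player1 ≠ player2 then
              co.modify player1 PySem.Dict.empty (fun row => row.modify player2 0 (· + 1))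
            else co) co) co) co) co
    = ((items.flatMap (fun mt => mt.2.items.map (fun tp => tp.2))).flatMap pvEvA).foldl pvNestStep co := by
  simp only [pvEvA, List.foldl_flatMap, List.foldl_map, List.foldl_filter, pvNestStep,
    bne_iff_ne, ne_eq]

theorem pv_loopB (items : List (Int × PySem.Dict Int (PySem.Dict Int Int))) (fl : PySem.Dict (Int × Int) Int) :
    items.foldl (fun fl mt =>
      mt.2.items.foldl (fun fl tc =>
        tc.2.items.foldl (fun fl pc =>
          tc.2.items.foldl (fun fl qc =>
            if pc.1 ≠ qc.1 then
              fl.insert (pc.1, qc.1) (fl.getD (pc.1, qc.1) 0 + pc.2 * qc.2)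
            else fl) fl) fl) fl) fl
    = ((items.flatMap (fun mt => mt.2.items.map (fun tc => tc.2))).flatMap pvEvB).foldl pvFlatStep fl := by
  simp only [pvEvB, List.foldl_flatMap, List.foldl_map, List.foldl_filter, pvFlatStep,
    PySem.Dict.modify, bne_iff_ne, ne_eq]

theorem pv_inner_rel (l : List (Int × Int × Int)) :
    l.foldl (fun td x => td.modify x.2.2 (PySem.Dict.empty : PySem.Dict Int Int) (fun cnt =>
        cnt.insert x.1 (cnt.getD x.1 0 + 1))) PySem.Dict.empty
    = PySem.Dict.mk ((l.foldl (fun td x => td.modify x.2.2 [] (fun ps => ps ++ [x.1]))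
        PySem.Dict.empty).items.map (fun tp => (tp.1, PySem.Dict.counter tp.2))) := by
  apply PySem.Dict.ext
  have hkA : (l.foldl (fun td x => td.modify x.2.2 [] (fun ps => ps ++ [x.1])) PySem.Dict.empty).keys
      = PySem.Set.ofList (l.map (fun x => x.2.2)) := by
    have h := PySem.Dict.keys_foldl_modify_key l (fun x => x.2.2) ([] : List Int)
      (fun _ x ps => ps ++ [x.1]) PySem.Dict.empty
    simp only [PySem.Dict.keys_empty, PySem.Set.update_nil_left] at h
    exact h
  have hnA : (l.foldl (fun td x => td.modify x.2.2 [] (fun ps => ps ++ [x.1])) PySem.Dict.empty).keys.Nodup :=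
    PySem.Dict.nodup_keys_foldl_modify_key l (fun x => x.2.2) [] (fun _ x ps => ps ++ [x.1])
      PySem.Dict.empty PySem.Dict.nodup_keys_empty
  have hkB : (l.foldl (fun td x => td.modify x.2.2 (PySem.Dict.empty : PySem.Dict Int Int) (fun cnt =>
        cnt.insert x.1 (cnt.getD x.1 0 + 1))) PySem.Dict.empty).keys
      = PySem.Set.ofList (l.map (fun x => x.2.2)) := by
    have h := PySem.Dict.keys_foldl_modify_key l (fun x => x.2.2)
      (PySem.Dict.empty : PySem.Dict Int Int)
      (fun _ x cnt => cnt.insert x.1 (cnt.getD x.1 0 + 1)) PySem.Dict.empty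
    simp only [PySem.Dict.keys_empty, PySem.Set.update_nil_left] at h
    exact h
  have hnB : (l.foldl (fun td x => td.modify x.2.2 (PySem.Dict.empty : PySem.Dict Int Int) (fun cnt =>
        cnt.insert x.1 (cnt.getD x.1 0 + 1))) PySem.Dict.empty).keys.Nodup :=
    PySem.Dict.nodup_keys_foldl_modify_key l (fun x => x.2.2) PySem.Dict.empty
      (fun _ x cnt => cnt.insert x.1 (cnt.getD x.1 0 + 1)) PySem.Dict.empty PySem.Dict.nodup_keys_empty
  have hgA : ∀ t, (l.foldl (fun td x => td.modify x.2.2 [] (fun ps => ps ++ [x.1]))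
        PySem.Dict.empty).getD t []
      = (l.filter (fun x => x.2.2 == t)).map (fun x => x.1) := by
    intro t
    have h := pv_getD_foldl_modify_key l (fun x => x.2.2) ([] : List Int)
      (fun x ps => ps ++ [x.1]) PySem.Dict.empty t
    simp only [PySem.Dict.getD_empty] at h
    rw [h, PySem.List.foldl_append_singleton_eq_map (fun x : Int × Int × Int => x.1)]
    simp
  have hgB : ∀ t, (l.foldl (fun td x => td.modify x.2.2 (PySem.Dict.empty : PySem.Dict Int Int) (fun cnt =>
        cnt.insert x.1 (cnt.getD x.1 0 + 1))) PySem.Dict.empty).getD t PySem.Dict.empty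
      = PySem.Dict.counter ((l.filter (fun x => x.2.2 == t)).map (fun x => x.1)) := by
    intro t
    have h := pv_getD_foldl_modify_key l (fun x => x.2.2)
      (PySem.Dict.empty : PySem.Dict Int Int)
      (fun x cnt => cnt.insert x.1 (cnt.getD x.1 0 + 1)) PySem.Dict.empty t
    simp only [PySem.Dict.getD_empty] at h
    have h2 : PySem.Dict.counter ((l.filter (fun x => x.2.2 == t)).map (fun x => x.1))
        = (l.filter (fun x => x.2.2 == t)).foldl
            (fun cnt x => cnt.insert x.1 (cnt.getD x.1 0 + 1)) PySem.Dict.empty := by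
      rw [← PySem.Dict.foldl_insert_getD_add_one_eq_counter, List.foldl_map]
    rw [h, h2]
  rw [PySem.Dict.items_eq_map_keys _ hnB PySem.Dict.empty,
      PySem.Dict.items_eq_map_keys _ hnA ([] : List Int), hkA, hkB, List.map_map]
  apply List.map_congr_left
  intro t _
  simp only [Function.comp]
  rw [hgA t, hgB t]

theorem pv_groups_rel (mh : List (Int × Int × Int)) :
    (mh.foldl (fun g x =>
      g.modify x.2.1 PySem.Dict.empty (fun teams =>
        teams.modify x.2.2 (PySem.Dict.empty : PySem.Dict Int Int) (fun cnt =>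
          cnt.insert x.1 (cnt.getD x.1 0 + 1)))) PySem.Dict.empty).items
    = (mh.foldl (fun mt x =>
      mt.modify x.2.1 PySem.Dict.empty (fun teams =>
        teams.modify x.2.2 [] (fun players => players ++ [x.1]))) PySem.Dict.empty).items.map
      (fun mt => (mt.1, PySem.Dict.mk (mt.2.items.map (fun tp => (tp.1, PySem.Dict.counter tp.2))))) := by
  have hkA : (mh.foldl (fun mt x =>
      mt.modify x.2.1 PySem.Dict.empty (fun teams =>
        teams.modify x.2.2 [] (fun players => players ++ [x.1]))) PySem.Dict.empty).keys
      = PySem.Set.ofList (mh.map (fun x => x.2.1)) := by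
    have h := PySem.Dict.keys_foldl_modify_key mh (fun x => x.2.1)
      (PySem.Dict.empty : PySem.Dict Int (List Int))
      (fun _ x teams => teams.modify x.2.2 [] (fun players => players ++ [x.1])) PySem.Dict.empty
    simp only [PySem.Dict.keys_empty, PySem.Set.update_nil_left] at h
    exact h
  have hnA : (mh.foldl (fun mt x =>
      mt.modify x.2.1 PySem.Dict.empty (fun teams =>
        teams.modify x.2.2 [] (fun players => players ++ [x.1]))) PySem.Dict.empty).keys.Nodup :=
    PySem.Dict.nodup_keys_foldl_modify_key mh (fun x => x.2.1) PySem.Dict.empty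
      (fun _ x teams => teams.modify x.2.2 [] (fun players => players ++ [x.1]))
      PySem.Dict.empty PySem.Dict.nodup_keys_empty
  have hkB : (mh.foldl (fun g x =>
      g.modify x.2.1 PySem.Dict.empty (fun teams =>
        teams.modify x.2.2 (PySem.Dict.empty : PySem.Dict Int Int) (fun cnt =>
          cnt.insert x.1 (cnt.getD x.1 0 + 1)))) PySem.Dict.empty).keys
      = PySem.Set.ofList (mh.map (fun x => x.2.1)) := by
    have h := PySem.Dict.keys_foldl_modify_key mh (fun x => x.2.1)
      (PySem.Dict.empty : PySem.Dict Int (PySem.Dict Int Int))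
      (fun _ x teams => teams.modify x.2.2 (PySem.Dict.empty : PySem.Dict Int Int) (fun cnt =>
        cnt.insert x.1 (cnt.getD x.1 0 + 1))) PySem.Dict.empty
    simp only [PySem.Dict.keys_empty, PySem.Set.update_nil_left] at h
    exact h
  have hnB : (mh.foldl (fun g x =>
      g.modify x.2.1 PySem.Dict.empty (fun teams =>
        teams.modify x.2.2 (PySem.Dict.empty : PySem.Dict Int Int) (fun cnt =>
          cnt.insert x.1 (cnt.getD x.1 0 + 1)))) PySem.Dict.empty).keys.Nodup :=
    PySem.Dict.nodup_keys_foldl_modify_key mh (fun x => x.2.1) PySem.Dict.empty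
      (fun _ x teams => teams.modify x.2.2 (PySem.Dict.empty : PySem.Dict Int Int) (fun cnt =>
        cnt.insert x.1 (cnt.getD x.1 0 + 1))) PySem.Dict.empty PySem.Dict.nodup_keys_empty
  have hgA : ∀ m, (mh.foldl (fun mt x =>
      mt.modify x.2.1 PySem.Dict.empty (fun teams =>
        teams.modify x.2.2 [] (fun players => players ++ [x.1]))) PySem.Dict.empty).getD m PySem.Dict.empty
      = (mh.filter (fun x => x.2.1 == m)).foldl (fun td x =>
          td.modify x.2.2 [] (fun ps => ps ++ [x.1])) PySem.Dict.empty := by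
    intro m
    have h := pv_getD_foldl_modify_key mh (fun x => x.2.1)
      (PySem.Dict.empty : PySem.Dict Int (List Int))
      (fun x teams => teams.modify x.2.2 [] (fun players => players ++ [x.1])) PySem.Dict.empty m
    simp only [PySem.Dict.getD_empty] at h
    exact h
  have hgB : ∀ m, (mh.foldl (fun g x =>
      g.modify x.2.1 PySem.Dict.empty (fun teams =>
        teams.modify x.2.2 (PySem.Dict.empty : PySem.Dict Int Int) (fun cnt =>
          cnt.insert x.1 (cnt.getD x.1 0 + 1)))) PySem.Dict.empty).getD m PySem.Dict.empty
      = (mh.filter (fun x => x.2.1 == m)).foldl (fun td x =>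
          td.modify x.2.2 (PySem.Dict.empty : PySem.Dict Int Int) (fun cnt =>
            cnt.insert x.1 (cnt.getD x.1 0 + 1))) PySem.Dict.empty := by
    intro m
    have h := pv_getD_foldl_modify_key mh (fun x => x.2.1)
      (PySem.Dict.empty : PySem.Dict Int (PySem.Dict Int Int))
      (fun x teams => teams.modify x.2.2 (PySem.Dict.empty : PySem.Dict Int Int) (fun cnt =>
        cnt.insert x.1 (cnt.getD x.1 0 + 1))) PySem.Dict.empty m
    simp only [PySem.Dict.getD_empty] at h
    exact h
  rw [PySem.Dict.items_eq_map_keys _ hnB PySem.Dict.empty,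
      PySem.Dict.items_eq_map_keys _ hnA PySem.Dict.empty, hkA, hkB, List.map_map]
  apply List.map_congr_left
  intro m _
  simp only [Function.comp]
  rw [hgA m, hgB m, pv_inner_rel]

-- ---- the two ports compute canonical forms of their event lists ----

theorem pv_portA_eq (match_history : List (Int × Int × Int)) :
    calculate_co_play_counts match_history = pvCanon ((pvGroups match_history).flatMap pvEvA) := by
  rw [← pv_canon_nest]
  simp only [calculate_co_play_counts, pvGroups]
  rw [pv_loopA]

theorem pv_portB_eq (match_history : List (Int × Int × Int)) :
    calculate_co_play_counts_alt match_history
      = pvCanon ((pvGroups match_history).flatMap (fun xs => pvEvB (PySem.Dict.counter xs))) := by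
  rw [← pv_canon_flat]
  simp only [calculate_co_play_counts_alt, pvGroups]
  rw [pv_loopB, pv_groups_rel]
  simp only [List.flatMap_map, List.map_map, List.flatMap_assoc]
  rfl

-- ---- the per-team event lists agree in canonical form ----

theorem pv_P1 (xs : List Int) :
    PySem.Set.ofList ((pvEvA xs).map (fun e => e.1))
      = PySem.Set.ofList ((pvEvB (PySem.Dict.counter xs)).map (fun e => e.1)) := by
  have hA : (pvEvA xs).map (fun e => e.1)
      = xs.flatMap (fun p => (xs.filter (fun q => p != q)).map (fun _ => p)) := by
    simp only [pvEvA, List.map_flatMap, List.map_map]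
    rfl
  have hB : (pvEvB (PySem.Dict.counter xs)).map (fun e => e.1)
      = (PySem.Set.ofList xs).flatMap
          (fun p => ((PySem.Set.ofList xs).filter (fun q => p != q)).map (fun _ => p)) := by
    simp only [pvEvB, PySem.Dict.items_counter, List.flatMap_map, List.map_flatMap,
      List.filter_map, List.map_map]
    rfl
  rw [hA, hB]
  by_cases hall : ∀ a ∈ xs, ∀ b ∈ xs, a = b
  · have hAnil : xs.flatMap (fun p => (xs.filter (fun q => p != q)).map (fun _ => p)) = [] := by
      rw [List.flatMap_eq_nil_iff]
      intro p hp
      have hf : xs.filter (fun q => p != q) = [] := by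
        rw [List.filter_eq_nil_iff]
        intro a ha
        simp [hall p hp a ha]
      rw [hf, List.map_nil]
    have hBnil : (PySem.Set.ofList xs).flatMap
        (fun p => ((PySem.Set.ofList xs).filter (fun q => p != q)).map (fun _ => p)) = [] := by
      rw [List.flatMap_eq_nil_iff]
      intro p hp
      have hpx : p ∈ xs := (PySem.Set.mem_ofList xs p).mp hp
      have hf : (PySem.Set.ofList xs).filter (fun q => p != q) = [] := by
        rw [List.filter_eq_nil_iff]
        intro a ha
        have hax : a ∈ xs := (PySem.Set.mem_ofList xs a).mp ha
        simp [hall p hpx a hax]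
      rw [hf, List.map_nil]
    rw [hAnil, hBnil]
  · push Not at hall
    obtain ⟨a, ha, b, hb, hab⟩ := hall
    have hne : ∀ p ∈ xs, ∃ c ∈ xs, ¬(p = c) := by
      intro p hp
      by_cases hpa : p = a
      · exact ⟨b, hb, fun h => hab (by rw [← hpa, h])⟩
      · exact ⟨a, ha, hpa⟩
    have h2gen : ∀ (s : List Int) (p : Int), ∀ z ∈ (s.filter (fun q => p != q)).map (fun _ => p), z = p := by
      intro s p z hz
      obtain ⟨r, _, hr⟩ := List.mem_map.mp hz
      exact hr.symm
    have h1A : ∀ p ∈ xs, (xs.filter (fun q => p != q)).map (fun _ => p) ≠ [] := by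
      intro p hp hnil
      obtain ⟨c, hc, hpc⟩ := hne p hp
      have hcm : c ∈ xs.filter (fun q => p != q) := List.mem_filter.mpr ⟨hc, by simpa using hpc⟩
      rw [List.map_eq_nil_iff] at hnil
      rw [hnil] at hcm
      exact absurd hcm List.not_mem_nil
    have h1B : ∀ p ∈ PySem.Set.ofList xs,
        ((PySem.Set.ofList xs).filter (fun q => p != q)).map (fun _ => p) ≠ [] := by
      intro p hp hnil
      have hpx : p ∈ xs := (PySem.Set.mem_ofList xs p).mp hp
      obtain ⟨c, hc, hpc⟩ := hne p hpx
      have hcs : c ∈ PySem.Set.ofList xs := (PySem.Set.mem_ofList xs c).mpr hc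
      have hcm : c ∈ (PySem.Set.ofList xs).filter (fun q => p != q) :=
        List.mem_filter.mpr ⟨hcs, by simpa using hpc⟩
      rw [List.map_eq_nil_iff] at hnil
      rw [hnil] at hcm
      exact absurd hcm List.not_mem_nil
    rw [← PySem.Set.update_nil_left, ← PySem.Set.update_nil_left,
        pv_update_flatMap_rep xs _ h1A (fun p _ => h2gen xs p) [],
        pv_update_flatMap_rep (PySem.Set.ofList xs) _ h1B (fun p _ => h2gen (PySem.Set.ofList xs) p) [],
        PySem.Set.update_nil_left, PySem.Set.update_nil_left,
        pv_ofList_idem (PySem.Set.ofList xs) (PySem.Set.nodup_ofList xs)]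

theorem pv_P2 (xs : List Int) (p : Int) :
    PySem.Set.ofList (pvQl (pvEvA xs) p) = PySem.Set.ofList (pvQl (pvEvB (PySem.Dict.counter xs)) p) := by
  have hA : pvQl (pvEvA xs) p
      = xs.flatMap (fun p1 => if p1 == p then xs.filter (fun q => p != q) else []) := by
    simp only [pvQl, pvEvA, List.filter_flatMap, List.map_flatMap, List.filter_map, List.map_map]
    apply List.flatMap_congr
    intro p1 _
    by_cases hb : p1 = p
    · subst hb
      simp [Function.comp_def]
    · simp [hb]
  have hB : pvQl (pvEvB (PySem.Dict.counter xs)) p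
      = (PySem.Set.ofList xs).flatMap
          (fun k => if k == p then (PySem.Set.ofList xs).filter (fun q => p != q) else []) := by
    simp only [pvQl, pvEvB, PySem.Dict.items_counter, List.flatMap_map, List.filter_flatMap,
      List.map_flatMap, List.filter_map, List.map_map]
    apply List.flatMap_congr
    intro k _
    by_cases hb : k = p
    · subst hb
      simp [Function.comp_def]
    · simp [hb]
  rw [hA, hB, ← PySem.Set.update_nil_left, ← PySem.Set.update_nil_left,
      pv_update_flatMap_if xs p (xs.filter (fun q => p != q)) [],
      pv_update_flatMap_if (PySem.Set.ofList xs) p ((PySem.Set.ofList xs).filter (fun q => p != q)) []]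
  by_cases hmem : p ∈ xs
  · have hmem2 : p ∈ PySem.Set.ofList xs := (PySem.Set.mem_ofList xs p).mpr hmem
    rw [if_pos hmem, if_pos hmem2, PySem.Set.update_nil_left, PySem.Set.update_nil_left,
        ← pv_ofList_filter,
        pv_ofList_idem (PySem.Set.ofList (xs.filter (fun q => p != q)))
          (PySem.Set.nodup_ofList (xs.filter (fun q => p != q)))]
  · have hmem2 : p ∉ PySem.Set.ofList xs := fun hm => hmem ((PySem.Set.mem_ofList xs p).mp hm)
    rw [if_neg hmem, if_neg hmem2]

theorem pv_P3 (xs : List Int) (p q : Int) :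
    pvSum (pvEvA xs) p q = pvSum (pvEvB (PySem.Dict.counter xs)) p q := by
  have hA : pvSum (pvEvA xs) p q
      = (xs.map (fun p1 => if p1 == p
          then (((xs.filter (fun r => p != r)).filter (fun r => r == q)).length : Int)
          else 0)).sum := by
    simp only [pvSum, pvEvA, List.filter_flatMap, List.map_flatMap]
    rw [pv_sum_flatMap]
    congr 1
    apply List.map_congr_left
    intro p1 _
    by_cases hb : p1 = p
    · subst hb
      simp only [beq_self_eq_true, if_pos]
      simp only [List.filter_map, List.map_map]
      simp [Function.comp_def]
    · simp [List.filter_map, Function.comp_def, hb]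
  have hB : pvSum (pvEvB (PySem.Dict.counter xs)) p q
      = ((PySem.Set.ofList xs).map (fun k => if k == p
          then ((((PySem.Set.ofList xs).filter (fun r => p != r)).filter (fun r => r == q)).map
            (fun r => (xs.count p : Int) * (xs.count r : Int))).sum
          else 0)).sum := by
    simp only [pvSum, pvEvB, PySem.Dict.items_counter, List.flatMap_map, List.filter_flatMap,
      List.map_flatMap]
    rw [pv_sum_flatMap]
    congr 1
    apply List.map_congr_left
    intro k _
    by_cases hb : k = p
    · subst hb
      simp only [beq_self_eq_true, if_pos]
      simp only [List.filter_map, List.map_map]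
      simp [Function.comp_def]
    · have hkp : (k == p) = false := by simp [hb]
      simp [List.filter_map, Function.comp_def, hkp]
  rw [hA, hB, pv_sum_ite_const, pv_sum_ite_const]
  by_cases hpq : p = q
  · subst hpq
    have h1 : (xs.filter (fun r => p != r)).filter (fun r => r == p) = [] := by
      rw [List.filter_eq_nil_iff]
      intro r hr
      have h2 := (List.mem_filter.mp hr).2
      simp only [bne_iff_ne, ne_eq] at h2
      simp only [beq_iff_eq]
      exact fun h => h2 h.symm
    have h1' : ((PySem.Set.ofList xs).filter (fun r => p != r)).filter (fun r => r == p) = [] := by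
      rw [List.filter_eq_nil_iff]
      intro r hr
      have h2 := (List.mem_filter.mp hr).2
      simp only [bne_iff_ne, ne_eq] at h2
      simp only [beq_iff_eq]
      exact fun h => h2 h.symm
    rw [h1, h1']
    simp
  · -- p ≠ q : the double filter is just the q-filter
    have hff : ∀ s : List Int, (s.filter (fun r => p != r)).filter (fun r => r == q)
        = s.filter (fun r => r == q) := by
      intro s
      rw [List.filter_filter]
      apply List.filter_congr
      intro r _
      by_cases hr : r = q
      · subst hr
        have : (p != r) = true := by simpa using fun h : p = r => hpq (by rw [h])
        simp [this]
      · simp [hr]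
    rw [hff, hff]
    have hlenA : ((xs.filter (fun r => r == q)).length : Int) = (xs.count q : Int) := by
      rw [List.count_eq_length_filter]
    have hmapB : (((PySem.Set.ofList xs).filter (fun r => r == q)).map
        (fun r => (xs.count p : Int) * (xs.count r : Int))).sum
        = (((PySem.Set.ofList xs).filter (fun r => r == q)).length : Int)
            * ((xs.count p : Int) * (xs.count q : Int)) := by
      rw [List.map_congr_left (g := fun _ => (xs.count p : Int) * (xs.count q : Int))
        (fun r hr => by
          have : r = q := by simpa using (List.mem_filter.mp hr).2
          rw [this])]
      rw [PySem.List.sum_map_const_int]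
    rw [hlenA, hmapB]
    have hlenB : (((PySem.Set.ofList xs).filter (fun r => r == q)).length : Int)
        = ((PySem.Set.ofList xs).count q : Int) := by
      rw [List.count_eq_length_filter]
    rw [hlenB]
    by_cases hq : q ∈ xs
    · have : (PySem.Set.ofList xs).count q = 1 :=
        List.count_eq_one_of_mem (PySem.Set.nodup_ofList xs) ((PySem.Set.mem_ofList xs q).mpr hq)
      rw [this]
      by_cases hp : p ∈ xs
      · have : (PySem.Set.ofList xs).count p = 1 :=
          List.count_eq_one_of_mem (PySem.Set.nodup_ofList xs) ((PySem.Set.mem_ofList xs p).mpr hp)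
        rw [this]
        push_cast
        ring
      · have hc0 : xs.count p = 0 := List.count_eq_zero.mpr hp
        have : (PySem.Set.ofList xs).count p = 0 :=
          List.count_eq_zero.mpr (fun hm => hp ((PySem.Set.mem_ofList xs p).mp hm))
        rw [this, hc0]
        push_cast
        ring
    · have hc0 : xs.count q = 0 := List.count_eq_zero.mpr hq
      have : (PySem.Set.ofList xs).count q = 0 :=
        List.count_eq_zero.mpr (fun hm => hq ((PySem.Set.mem_ofList xs q).mp hm))
      rw [this, hc0]
      push_cast
      ring

theorem pv_canon_cross (gs : List (List Int)) :
    pvCanon (gs.flatMap pvEvA) = pvCanon (gs.flatMap (fun xs => pvEvB (PySem.Dict.counter xs))) := by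
  have hX1 : PySem.Set.ofList ((gs.flatMap pvEvA).map (fun e => e.1))
      = PySem.Set.ofList ((gs.flatMap (fun xs => pvEvB (PySem.Dict.counter xs))).map (fun e => e.1)) := by
    rw [List.map_flatMap, List.map_flatMap]
    exact pv_ofList_flatMap_congr gs _ _ (fun xs _ => pv_P1 xs)
  have hX2 : ∀ p, PySem.Set.ofList (pvQl (gs.flatMap pvEvA) p)
      = PySem.Set.ofList (pvQl (gs.flatMap (fun xs => pvEvB (PySem.Dict.counter xs))) p) := by
    intro p
    simp only [pvQl, List.filter_flatMap, List.map_flatMap]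
    exact pv_ofList_flatMap_congr gs _ _ (fun xs _ => by
      have h := pv_P2 xs p
      simpa [pvQl] using h)
  have hX3 : ∀ p q, pvSum (gs.flatMap pvEvA) p q
      = pvSum (gs.flatMap (fun xs => pvEvB (PySem.Dict.counter xs))) p q := by
    intro p q
    simp only [pvSum, List.filter_flatMap, List.map_flatMap]
    rw [pv_sum_flatMap, pv_sum_flatMap]
    refine congrArg List.sum (List.map_congr_left fun xs _ => ?_)
    have h := pv_P3 xs p q
    simpa [pvSum] using h
  simp only [pvCanon]
  rw [hX1]
  apply List.map_congr_left
  intro p _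
  rw [hX2 p]
  refine congrArg (fun z => (p, z)) ?_
  apply List.map_congr_left
  intro q _
  rw [hX3 p q]

-- ===== VERDICT (by name: the statement is the Claim_ definition above) =====
theorem calculate_co_play_counts_spec : Claim_equal_calculate_co_play_counts := by
  intro mh _
  show _ = _
  rw [pv_portA_eq, pv_portB_eq, pv_canon_cross]
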